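-- pv_equiv track=rewrite | github.com/yokosyun/atcoder-python | ABC/ABC023/B.py | solve
-- ===== SOURCE A (Python) =====
-- def n_1(left, right):
--     return left == "a" and right == "c"
--
-- def n_2(left, right):
--     return left == "c" and right == "a"
--
-- def n_0(left, right):
--     return left == "b" and right == "b"
--
-- def solve(n, s):
--     if n % 2 == 0:
--         return -1
--
--     middle_idx = (n - 1) // 2
--
--     val = s[middle_idx]
--     if val != "b":
--         return -1
--
--     cnt = 0
--     for idx in range(1, middle_idx + 1):
--         cnt += 1
--         left = s[middle_idx - idx]
--         right = s[middle_idx + idx]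
--
--         if cnt % 3 == 1:
--             if not n_1(left, right):
--                 return -1
--         elif cnt % 3 == 2:
--             if not n_2(left, right):
--                 return -1
--         else:
--             if not n_0(left, right):
--                 return -1
--     return cnt
-- ===== SOURCE B (Python) =====
-- def solve(n, s):
--     if n % 2 == 0:
--         return -1
--     m = (n - 1) // 2
--     chars = []
--     for idx in range(-m, m + 1):
--         k = abs(idx) % 3
--         if k == 0:
--             chars.append("b")
--         elif k == 1:
--             chars.append("a" if idx < 0 else "c")
--         else:
--             chars.append("c" if idx < 0 else "a")
--     return m if s == "".join(chars) else -1
-- ===== Notes on version B (the rewrite author's own statement) =====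
-- stated objective: simpler
-- what changed: B replaces A's symmetric early-exit pair-validation loop (middle check plus per-distance left/right tests) with building the whole expected string from a per-offset rule and one equality comparison.
-- outside the precondition, e.g. on solve(3, 'abcx'): A returns 1, B returns -1; on solve(-1, 'b'): A returns 0, B returns -1; on solve(3, 'x'): A raises IndexError, B returns -1
import Mathlib
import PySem

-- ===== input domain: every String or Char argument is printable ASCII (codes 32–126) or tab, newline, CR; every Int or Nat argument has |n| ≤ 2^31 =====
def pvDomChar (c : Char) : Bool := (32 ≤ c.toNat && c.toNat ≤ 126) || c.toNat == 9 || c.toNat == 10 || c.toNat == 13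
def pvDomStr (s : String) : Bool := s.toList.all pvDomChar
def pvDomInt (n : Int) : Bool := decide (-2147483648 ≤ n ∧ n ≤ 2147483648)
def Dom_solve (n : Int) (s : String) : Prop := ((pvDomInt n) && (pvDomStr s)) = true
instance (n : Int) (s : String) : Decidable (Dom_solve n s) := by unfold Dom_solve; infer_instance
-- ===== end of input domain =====

-- B replaces A's symmetric early-exit pair-validation loop with building the whole expected
-- string from a per-offset rule and comparing once (objective: simpler decomposition).

-- ===== PORT A =====
def pvN1 (left right : Char) : Bool := left == 'a' && right == 'c'
def pvN2 (left right : Char) : Bool := left == 'c' && right == 'a'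
def pvN0 (left right : Char) : Bool := left == 'b' && right == 'b'

-- the `for idx in range(1, middle_idx+1)` loop with early return; state = cnt
def solveLoop (l : List Char) (m : Int) : List Int → Int → Int
  | [], cnt => cnt
  | idx :: rest, cnt =>
    let cnt' := cnt + 1
    let left := PySem.List.pyGetD l (m - idx) ' '
    let right := PySem.List.pyGetD l (m + idx) ' '
    if PySem.Int.mod cnt' 3 = 1 then
      if !(pvN1 left right) then -1 else solveLoop l m rest cnt'
    else if PySem.Int.mod cnt' 3 = 2 then
      if !(pvN2 left right) then -1 else solveLoop l m rest cnt'
    else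
      if !(pvN0 left right) then -1 else solveLoop l m rest cnt'

def solve (n : Int) (s : String) : Int :=
  if PySem.Int.mod n 2 = 0 then -1
  else
    let middle_idx := PySem.Int.floordiv (n - 1) 2
    let val := PySem.List.pyGetD s.toList middle_idx ' '
    if val ≠ 'b' then -1
    else solveLoop s.toList middle_idx (PySem.List.pyRange 1 (middle_idx + 1) 1) 0

-- ===== PORT B =====
-- expected character at signed offset idx from the middle
def expChar (idx : Int) : Char :=
  if PySem.Int.mod |idx| 3 = 0 then 'b'
  else if PySem.Int.mod |idx| 3 = 1 then (if idx < 0 then 'a' else 'c')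
  else (if idx < 0 then 'c' else 'a')

def solve_alt (n : Int) (s : String) : Int :=
  if PySem.Int.mod n 2 = 0 then -1
  else
    let m := PySem.Int.floordiv (n - 1) 2
    let expected := (PySem.List.pyRange (-m) (m + 1) 1).map expChar
    if s.toList = expected then m else -1

-- ===== PRECONDITION & SPEC =====
-- Pre_ admits every even n (A returns -1 without touching s) and otherwise requires
-- 0 ≤ n = len(s); it excludes odd n with n < 0 or n ≠ len(s), on which A's indexing
-- either raises IndexError or returns a value only via negative-index wraparound /
-- validation of a string of the wrong length — artefacts of A's index arithmetic.
def Pre_solve (n : Int) (s : String) : Prop := n % 2 = 0 ∨ (0 ≤ n ∧ n = (s.length : Int))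
instance (n : Int) (s : String) : Decidable (Pre_solve n s) := by unfold Pre_solve; infer_instance

def pvWitness_solve : Int × String := (3, "abc")

def Spec_solve (n : Int) (s : String) (out : Int) : Prop := out = solve_alt n s
instance (n : Int) (s : String) (out : Int) : Decidable (Spec_solve n s out) := by unfold Spec_solve; infer_instance

-- ===== CLAIM (what is proved, stated in full; the proofs are below) =====
def Claim_equal_solve : Prop := ∀ (n : Int) (s : String), Dom_solve n s → Pre_solve n s → Spec_solve n s (solve n s)

-- ===== LEMMAS AND PROOFS =====

-- the per-distance test A applies at distance j from the middle (cnt = j there)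
def pairOK (l : List Char) (m j : Int) : Bool :=
  let left := PySem.List.pyGetD l (m - j) ' '
  let right := PySem.List.pyGetD l (m + j) ' '
  if PySem.Int.mod j 3 = 1 then pvN1 left right
  else if PySem.Int.mod j 3 = 2 then pvN2 left right
  else pvN0 left right

lemma loop_eq (l : List Char) (m : Int) : ∀ (d : Nat) (i : Int), i + d = m + 1 →
    solveLoop l m (PySem.List.pyRange i (m + 1) 1) (i - 1) =
      if (PySem.List.pyRange i (m + 1) 1).all (pairOK l m) then m else -1 := by
  intro d
  induction d with
  | zero =>
    intro i hi
    rw [PySem.List.pyRange_one_eq_nil (by omega)]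
    simp only [solveLoop, List.all_nil, if_pos]
    omega
  | succ d ih =>
    intro i hi
    have hcons : PySem.List.pyRange i (m + 1) 1 = i :: PySem.List.pyRange (i + 1) (m + 1) 1 :=
      PySem.List.pyRange_one_cons (by omega)
    have hi1 : i - 1 + 1 = i := by ring
    have ih' := ih (i + 1) (by omega)
    have hi2 : i + 1 - 1 = i := by ring
    rw [hi2] at ih'
    rw [hcons]
    simp only [solveLoop, hi1, List.all_cons]
    by_cases h1 : PySem.Int.mod i 3 = 1
    · have hPok : pairOK l m i = pvN1 (PySem.List.pyGetD l (m - i) ' ') (PySem.List.pyGetD l (m + i) ' ') := by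
        simp only [pairOK, if_pos h1]
      rw [if_pos h1]
      by_cases hp : pvN1 (PySem.List.pyGetD l (m - i) ' ') (PySem.List.pyGetD l (m + i) ' ') = true
      · rw [if_neg (by simp [hp]), ih']
        simp only [hPok, hp, Bool.true_and]
      · have hpf := Bool.eq_false_iff.mpr hp
        rw [if_pos (by simp [hpf])]
        simp only [hPok, hpf, Bool.false_and]
        simp
    · rw [if_neg h1]
      by_cases h2 : PySem.Int.mod i 3 = 2
      · have hPok : pairOK l m i = pvN2 (PySem.List.pyGetD l (m - i) ' ') (PySem.List.pyGetD l (m + i) ' ') := by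
          simp only [pairOK, if_neg h1, if_pos h2]
        rw [if_pos h2]
        by_cases hp : pvN2 (PySem.List.pyGetD l (m - i) ' ') (PySem.List.pyGetD l (m + i) ' ') = true
        · rw [if_neg (by simp [hp]), ih']
          simp only [hPok, hp, Bool.true_and]
        · have hpf := Bool.eq_false_iff.mpr hp
          rw [if_pos (by simp [hpf])]
          simp only [hPok, hpf, Bool.false_and]
          simp
      · have hPok : pairOK l m i = pvN0 (PySem.List.pyGetD l (m - i) ' ') (PySem.List.pyGetD l (m + i) ' ') := by
          simp only [pairOK, if_neg h1, if_neg h2]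
        rw [if_neg h2]
        by_cases hp : pvN0 (PySem.List.pyGetD l (m - i) ' ') (PySem.List.pyGetD l (m + i) ' ') = true
        · rw [if_neg (by simp [hp]), ih']
          simp only [hPok, hp, Bool.true_and]
        · have hpf := Bool.eq_false_iff.mpr hp
          rw [if_pos (by simp [hpf])]
          simp only [hPok, hpf, Bool.false_and]
          simp

lemma pairOK_iff (l : List Char) (m j : Int) (hj : 1 ≤ j) :
    pairOK l m j = true ↔
      PySem.List.pyGetD l (m - j) ' ' = expChar (-j) ∧
      PySem.List.pyGetD l (m + j) ' ' = expChar j := by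
  have hmod : PySem.Int.mod j 3 = j % 3 := PySem.Int.mod_eq_emod_of_pos (by norm_num)
  have habs : |j| = j := abs_of_pos (by omega)
  have habsn : |(-j)| = j := by rw [abs_neg, habs]
  have hnn : ¬ j < 0 := by omega
  have hneg : -j < 0 := by omega
  have hpos : (0 : Int) < j := by omega
  have h3 : j % 3 = 0 ∨ j % 3 = 1 ∨ j % 3 = 2 := by omega
  rcases h3 with h | h | h <;>
    simp [pairOK, expChar, habs, habsn, hnn, hpos, h, pvN0, pvN1, pvN2, and_comm]

lemma pyGetD_nat (l : List Char) (p : Nat) (hp : p < l.length) :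
    PySem.List.pyGetD l (p : Int) ' ' = l[p] := by
  rw [PySem.List.pyGetD_natCast]
  exact List.getD_eq_getElem l ' ' hp

lemma getE (M : Nat) (t : Int) (h1 : -(M : Int) ≤ t) (h2 : t ≤ (M : Int)) :
    PySem.List.pyGetD ((PySem.List.pyRange (-(M : Int)) ((M : Int) + 1) 1).map expChar) ((M : Int) + t) ' '
      = expChar t := by
  have hk : (M : Int) + t = ((M + t).toNat : Int) := by omega
  rw [hk, PySem.List.pyGetD_map_pyRange_one expChar (-(M : Int)) ((M : Int) + 1) (M + t).toNat ' '
    (by omega)]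
  congr 1
  omega

lemma key (l : List Char) (M : Nat) (hlen : l.length = 2 * M + 1) :
    (if PySem.List.pyGetD l (M : Int) ' ' ≠ 'b' then (-1 : Int)
     else solveLoop l (M : Int) (PySem.List.pyRange 1 ((M : Int) + 1) 1) 0)
    = (if l = (PySem.List.pyRange (-(M : Int)) ((M : Int) + 1) 1).map expChar then (M : Int) else -1) := by
  have hloop := loop_eq l (M : Int) M 1 (by omega)
  rw [show (1 : Int) - 1 = 0 from by norm_num] at hloop
  have lenE : ((PySem.List.pyRange (-(M : Int)) ((M : Int) + 1) 1).map expChar).length = 2 * M + 1 := by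
    simp [PySem.List.length_pyRange_one]
    omega
  have hiff : (PySem.List.pyGetD l (M : Int) ' ' = 'b' ∧
      (PySem.List.pyRange 1 ((M : Int) + 1) 1).all (pairOK l (M : Int)) = true) ↔
      l = (PySem.List.pyRange (-(M : Int)) ((M : Int) + 1) 1).map expChar := by
    constructor
    · rintro ⟨hb, hall⟩
      apply List.ext_getElem (by omega)
      intro p hp hp2
      have hEp : ((PySem.List.pyRange (-(M : Int)) ((M : Int) + 1) 1).map expChar)[p] =
          expChar (-(M : Int) + p) := by
        simp [PySem.List.getElem_pyRange_one]
      rw [hEp]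
      rcases lt_trichotomy p M with hpM | hpM | hpM
      · have hj : (1 : Int) ≤ (M : Int) - p := by omega
        have hmem : ((M : Int) - p) ∈ PySem.List.pyRange 1 ((M : Int) + 1) 1 :=
          PySem.List.mem_pyRange_one.mpr ⟨by omega, by omega⟩
        have hok := List.all_eq_true.mp hall _ hmem
        have hleft := ((pairOK_iff l (M : Int) ((M : Int) - p) hj).mp hok).1
        rw [show (M : Int) - ((M : Int) - p) = (p : Int) from by omega] at hleft
        rw [pyGetD_nat l p hp] at hleft
        rw [hleft]
        congr 1
        omega
      · subst hpM
        rw [pyGetD_nat l p hp] at hb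
        rw [hb, show -(p : Int) + p = 0 from by omega]
        decide
      · have hj : (1 : Int) ≤ (p : Int) - M := by omega
        have hmem : ((p : Int) - M) ∈ PySem.List.pyRange 1 ((M : Int) + 1) 1 :=
          PySem.List.mem_pyRange_one.mpr ⟨by omega, by omega⟩
        have hok := List.all_eq_true.mp hall _ hmem
        have hright := ((pairOK_iff l (M : Int) ((p : Int) - M) hj).mp hok).2
        rw [show (M : Int) + ((p : Int) - M) = (p : Int) from by omega] at hright
        rw [pyGetD_nat l p hp] at hright
        rw [hright]
        congr 1
        omega
    · intro hE
      subst hE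
      constructor
      · have := getE M 0 (by omega) (by omega)
        rw [show (M : Int) + 0 = (M : Int) from by ring] at this
        rw [this]
        decide
      · rw [List.all_eq_true]
        intro j hj
        obtain ⟨hj1, hj2⟩ := PySem.List.mem_pyRange_one.mp hj
        rw [pairOK_iff _ _ _ hj1]
        constructor
        · rw [show (M : Int) - j = (M : Int) + (-j) from by ring]
          exact getE M (-j) (by omega) (by omega)
        · exact getE M j (by omega) (by omega)
  rw [hloop]
  by_cases hE : l = (PySem.List.pyRange (-(M : Int)) ((M : Int) + 1) 1).map expChar
  · obtain ⟨hb, hall⟩ := hiff.mpr hE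
    rw [if_neg (by simp [hb]), if_pos hall, if_pos hE]
  · rw [if_neg hE]
    by_cases hb : PySem.List.pyGetD l (M : Int) ' ' = 'b'
    · have hallf : ¬ ((PySem.List.pyRange 1 ((M : Int) + 1) 1).all (pairOK l (M : Int)) = true) := by
        intro hall
        exact hE (hiff.mp ⟨hb, hall⟩)
      rw [if_neg (by simp [hb]), if_neg hallf]
    · rw [if_pos hb]

-- ===== VERDICT (by name: the statement is the Claim_ definition above) =====
theorem solve_spec : Claim_equal_solve := by
  intro n s _hdom hpre
  unfold Spec_solve solve solve_alt
  by_cases h2 : PySem.Int.mod n 2 = 0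
  · rw [if_pos h2, if_pos h2]
  · have hm2 : n % 2 = 1 := by
      rw [PySem.Int.mod_eq_emod_of_pos (by norm_num)] at h2
      omega
    obtain ⟨hn0, hlen⟩ : 0 ≤ n ∧ n = (s.length : Int) := by
      rcases hpre with h | h
      · omega
      · exact h
    set M : Nat := ((n - 1) / 2).toNat with hMdef
    have hM : n = 2 * (M : Int) + 1 := by omega
    have hfd : PySem.Int.floordiv (n - 1) 2 = (M : Int) := by
      rw [PySem.Int.floordiv_eq_ediv_of_pos (by norm_num)]
      omega
    have hlist : s.toList.length = 2 * M + 1 := by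
      have h := hlen
      simp only [← String.length_toList] at h 
      omega
    rw [if_neg h2, if_neg h2]
    simp only [hfd]
    exact key s.toList M hlist
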